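-- pv_equiv track=rewrite | github.com/diaodiaozhuye/awesome-ai-startups | scrapers/sources/glassdoor.py | _normalize_employee_count
-- ===== SOURCE A (Python) =====
-- _EMPLOYEE_RANGES = {
--     "1-10",
--     "11-50",
--     "51-200",
--     "201-500",
--     "501-1000",
--     "1001-5000",
--     "5001+",
-- }
--
-- def _normalize_employee_count(raw: str) -> str | None:
--     """Map a raw employee count string to a valid schema range."""
--     if not raw:
--         return None
--     raw = raw.strip().replace(" ", "").replace(",", "")
--     if raw in _EMPLOYEE_RANGES:
--         return raw
--     # Try to extract a number and map to the closest range
--     digits = "".join(c for c in raw if c.isdigit())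
--     if not digits:
--         return None
--     count = int(digits)
--     if count <= 10:
--         return "1-10"
--     if count <= 50:
--         return "11-50"
--     if count <= 200:
--         return "51-200"
--     if count <= 500:
--         return "201-500"
--     if count <= 1000:
--         return "501-1000"
--     if count <= 5000:
--         return "1001-5000"
--     return "5001+"
-- ===== SOURCE B (Python) =====
-- _EMPLOYEE_RANGES = {
--     "1-10",
--     "11-50",
--     "51-200",
--     "201-500",
--     "501-1000",
--     "1001-5000",
--     "5001+",
-- }
--
-- _BOUNDS = [10, 50, 200, 500, 1000, 5000]
-- _LABELS = ["1-10", "11-50", "51-200", "201-500", "501-1000", "1001-5000", "5001+"]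
--
--
-- def _normalize_employee_count(raw: str) -> str | None:
--     """Map a raw employee count string to a valid schema range."""
--     if not raw:
--         return None
--     raw = raw.strip().replace(" ", "").replace(",", "")
--     if raw in _EMPLOYEE_RANGES:
--         return raw
--     digits = "".join(c for c in raw if c.isdigit())
--     if not digits:
--         return None
--     count = int(digits)
--     # binary search for the first boundary >= count (bisect_left)
--     lo, hi = 0, len(_BOUNDS)
--     while lo < hi:
--         mid = (lo + hi) // 2
--         if _BOUNDS[mid] < count:
--             lo = mid + 1
--         else:
--             hi = mid
--     return _LABELS[lo]
-- ===== Notes on version B (the rewrite author's own statement) =====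
-- stated objective: idiomatic
-- what changed: The linear if-cascade over thresholds is replaced by a sorted boundary/label table with a hand-rolled bisect_left binary search to pick the bucket; the normalization/digit-extraction preamble is unchanged.
import Mathlib
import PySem

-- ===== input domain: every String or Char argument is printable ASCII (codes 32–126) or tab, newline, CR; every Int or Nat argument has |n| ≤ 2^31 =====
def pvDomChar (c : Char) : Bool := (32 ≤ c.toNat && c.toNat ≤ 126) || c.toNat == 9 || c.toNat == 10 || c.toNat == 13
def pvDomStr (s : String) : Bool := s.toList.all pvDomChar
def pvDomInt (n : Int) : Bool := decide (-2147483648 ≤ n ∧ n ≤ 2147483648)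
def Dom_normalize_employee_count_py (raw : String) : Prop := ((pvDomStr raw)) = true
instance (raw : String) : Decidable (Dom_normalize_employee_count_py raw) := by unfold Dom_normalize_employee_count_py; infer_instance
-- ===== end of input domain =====

-- B replaces A's linear if-cascade over thresholds with a binary search (bisect_left) into a
-- sorted boundary/label table; objective: idiomatic table-driven bucketing, same cost in practice.

-- ===== PORT A =====
def pvEmployeeRanges : PySem.Set String :=
  PySem.Set.ofList ["1-10", "11-50", "51-200", "201-500", "501-1000", "1001-5000", "5001+"]

-- A's threshold cascade on the extracted count
def pvCascade (count : Int) : String :=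
  if count ≤ 10 then "1-10"
  else if count ≤ 50 then "11-50"
  else if count ≤ 200 then "51-200"
  else if count ≤ 500 then "201-500"
  else if count ≤ 1000 then "501-1000"
  else if count ≤ 5000 then "1001-5000"
  else "5001+"

def normalize_employee_count_py (raw : String) : Option String :=
  if raw == "" then none
  else
    let r := PySem.Str.replace (PySem.Str.replace (PySem.Str.strip raw) " " "") "," ""
    if PySem.Set.contains pvEmployeeRanges r then some r
    else
      let digits := String.ofList (r.toList.filter PySem.Chars.isdigit)
      if digits == "" then none
      else
        -- int(digits): never fails here, since digits is a nonempty string of ASCII digits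
        let count := (PySem.Int.ofStr? digits).getD 0
        some (pvCascade count)

-- ===== PORT B =====
def pvBounds : List Int := [10, 50, 200, 500, 1000, 5000]
def pvLabels : List String := ["1-10", "11-50", "51-200", "201-500", "501-1000", "1001-5000", "5001+"]

-- hand-rolled bisect_left loop from Source B
def pvBisect (c : Int) (lo hi : Nat) : Nat :=
  if lo < hi then
    let mid := (lo + hi) / 2
    if pvBounds.getD mid 0 < c then pvBisect c (mid + 1) hi else pvBisect c lo mid
  else lo
termination_by hi - lo
decreasing_by all_goals omega

def normalize_employee_count_py_alt (raw : String) : Option String :=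
  if raw == "" then none
  else
    let r := PySem.Str.replace (PySem.Str.replace (PySem.Str.strip raw) " " "") "," ""
    if PySem.Set.contains pvEmployeeRanges r then some r
    else
      let digits := String.ofList (r.toList.filter PySem.Chars.isdigit)
      if digits == "" then none
      else
        -- int(digits): never fails here, since digits is a nonempty string of ASCII digits
        let count := (PySem.Int.ofStr? digits).getD 0
        some (pvLabels.getD (pvBisect count 0 6) "")

-- ===== PRECONDITION & SPEC =====
def Spec_normalize_employee_count_py (raw : String) (out : Option String) : Prop := out = normalize_employee_count_py_alt raw
instance (raw : String) (out : Option String) : Decidable (Spec_normalize_employee_count_py raw out) := by unfold Spec_normalize_employee_count_py; infer_instance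

-- ===== CLAIM (what is proved, stated in full; the proofs are below) =====
def Claim_equal_normalize_employee_count_py : Prop := ∀ (raw : String), Dom_normalize_employee_count_py raw → Spec_normalize_employee_count_py raw (normalize_employee_count_py raw)

-- ===== LEMMAS AND PROOFS =====

-- the binary search into the label table agrees with A's cascade on every count
theorem pvBisect_eq_cascade (c : Int) : pvLabels.getD (pvBisect c 0 6) "" = pvCascade c := by
  have step : ∀ lo hi : Nat, lo < hi →
      pvBisect c lo hi = if pvBounds.getD ((lo + hi) / 2) 0 < c
        then pvBisect c ((lo + hi) / 2 + 1) hi else pvBisect c lo ((lo + hi) / 2) := by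
    intro lo hi h; rw [pvBisect]; simp [h]
  have base : ∀ lo : Nat, pvBisect c lo lo = lo := by
    intro lo; rw [pvBisect]; simp
  rw [step 0 6 (by norm_num), step 0 3 (by norm_num), step 0 1 (by norm_num),
      step 2 3 (by norm_num), step 4 6 (by norm_num), step 4 5 (by norm_num)]
  norm_num [pvBounds]
  rw [base, base, base, base, base, base, base]
  unfold pvCascade pvLabels
  split_ifs <;> first | rfl | omega

-- ===== VERDICT (by name: the statement is the Claim_ definition above) =====
theorem normalize_employee_count_py_spec : Claim_equal_normalize_employee_count_py := by
  intro raw _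
  unfold Spec_normalize_employee_count_py normalize_employee_count_py normalize_employee_count_py_alt
  simp only [pvBisect_eq_cascade]
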